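-- pv_equiv track=rewrite | github.com/itrin9634/Algorithm-Study | 프로그래머스/lv2/42584. 주식가격/주식가격.py | solution
-- ===== SOURCE A (Python) =====
-- def solution(prices):
--     answer = []
--     for i in range(len(prices)):
--         now = prices[i]
--         time = 0
--         for j in range(i+1, len(prices)):
--             time += 1
--             if prices[j] < now:
--                 answer.append(time)
--                 break
--         else:
--             answer.append(time)
--
--     return answer
-- ===== SOURCE B (Python) =====
-- def solution(prices):
--     n = len(prices)
--     answer = [0] * n
--     stack = []
--     for i in range(n):
--         p = prices[i]
--         while stack and prices[stack[-1]] > p: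
--             j = stack.pop()
--             answer[j] = i - j
--         stack.append(i)
--     while stack:
--         j = stack.pop()
--         answer[j] = n - 1 - j
--     return answer
-- ===== Notes on version B (the rewrite author's own statement) =====
-- stated objective: faster
-- what changed: Replaced the per-index forward scan with a single pass keeping a monotonic stack of indices whose drop time is not yet known, popping when a lower price appears.
import Mathlib
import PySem

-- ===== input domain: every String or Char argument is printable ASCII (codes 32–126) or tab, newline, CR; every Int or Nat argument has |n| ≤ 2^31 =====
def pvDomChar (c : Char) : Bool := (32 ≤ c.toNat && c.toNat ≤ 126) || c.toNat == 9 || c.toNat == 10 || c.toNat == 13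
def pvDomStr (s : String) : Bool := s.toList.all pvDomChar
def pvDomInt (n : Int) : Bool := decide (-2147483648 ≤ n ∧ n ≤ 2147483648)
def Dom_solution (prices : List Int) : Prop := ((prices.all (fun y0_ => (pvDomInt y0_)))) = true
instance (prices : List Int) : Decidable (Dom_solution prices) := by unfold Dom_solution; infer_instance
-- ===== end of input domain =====

-- B replaces A's quadratic per-index forward scan by a single pass with a monotonic
-- stack of indices (pop when a strictly lower price appears); return values agree on all inputs.

-- ===== PORT A =====
-- inner loop of A: walk the remaining prices, counting, stop at the first strict drop
def aTimeA (now : Int) : List Int → Int → Int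
  | [], time => time
  | p :: rest, time =>
    let time := time + 1
    if p < now then time else aTimeA now rest time

def solution (prices : List Int) : List Int :=
  (List.range prices.length).map (fun i => aTimeA (prices.getD i 0) (prices.drop (i + 1)) 0)

-- ===== PORT B =====
-- while stack and prices[stack[-1]] > p: pop and record i - j
def popLoop (prices : List Int) (p : Int) (i : Nat) : List Nat → List Int → List Nat × List Int
  | [], ans => ([], ans)
  | j :: s, ans =>
    if prices.getD j 0 > p then
      popLoop prices p i s (ans.set j ((i : Int) - (j : Int)))
    else (j :: s, ans)

-- final while stack: pop and record n - 1 - j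
def drainLoop (n : Nat) : List Nat → List Int → List Int
  | [], ans => ans
  | j :: s, ans => drainLoop n s (ans.set j ((n : Int) - 1 - (j : Int)))

def solution_alt (prices : List Int) : List Int :=
  let n := prices.length
  let st := (List.range n).foldl
    (fun st i =>
      let r := popLoop prices (prices.getD i 0) i st.1 st.2
      (i :: r.1, r.2))
    ([], List.replicate n 0)
  drainLoop n st.1 st.2

-- ===== PRECONDITION & SPEC =====
def Spec_solution (prices : List Int) (out : List Int) : Prop := out = solution_alt prices
instance (prices : List Int) (out : List Int) : Decidable (Spec_solution prices out) := by unfold Spec_solution; infer_instance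

-- ===== CLAIM (what is proved, stated in full; the proofs are below) =====
def Claim_equal_solution : Prop := ∀ (prices : List Int), Dom_solution prices → Spec_solution prices (solution prices)

-- ===== LEMMAS AND PROOFS =====

-- the value A records for index j
def specT (prices : List Int) (j : Nat) : Int :=
  aTimeA (prices.getD j 0) (prices.drop (j + 1)) 0

lemma aTimeA_acc (now : Int) (l : List Int) (t : Int) :
    aTimeA now l t = t + aTimeA now l 0 := by
  induction l generalizing t with
  | nil => simp [aTimeA]
  | cons p rest ih =>
    simp only [aTimeA]
    by_cases h : p < now
    · simp [h]
    · simp only [h, if_false]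
      rw [ih (t + 1), ih (0 + 1)]
      ring

lemma aTimeA_found (now : Int) (l : List Int) (k : Nat) (hk : k < l.length)
    (hfirst : ∀ m, m < k → ¬ l.getD m 0 < now) (hd : l.getD k 0 < now) :
    aTimeA now l 0 = (k : Int) + 1 := by
  induction l generalizing k with
  | nil => simp at hk
  | cons p rest ih =>
    simp only [aTimeA]
    cases k with
    | zero =>
      simp only [List.getD_cons_zero] at hd
      simp [hd]
    | succ m =>
      have hp : ¬ p < now := by
        have := hfirst 0 (Nat.succ_pos m); simpa using this
      simp only [hp, if_false]
      rw [aTimeA_acc]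
      have : aTimeA now rest 0 = (m : Int) + 1 := by
        apply ih m (by simpa using hk)
        · intro m' hm'; have := hfirst (m' + 1) (by omega); simpa using this
        · simpa using hd
      rw [this]; push_cast; ring

lemma aTimeA_none (now : Int) (l : List Int)
    (hnd : ∀ m, m < l.length → ¬ l.getD m 0 < now) :
    aTimeA now l 0 = (l.length : Int) := by
  induction l with
  | nil => simp [aTimeA]
  | cons p rest ih =>
    have hp : ¬ p < now := by have := hnd 0 (by simp); simpa using this
    simp only [aTimeA, hp, if_false]
    rw [aTimeA_acc]
    have : aTimeA now rest 0 = (rest.length : Int) := by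
      apply ih; intro m hm; have := hnd (m + 1) (by simpa using Nat.succ_lt_succ hm)
      simpa using this
    rw [this]; push_cast [List.length_cons]; ring

lemma getD_drop (l : List Int) (a m : Nat) :
    (l.drop a).getD m 0 = l.getD (a + m) 0 := by
  simp [List.getD_eq_getElem?_getD, List.getElem?_drop]

lemma specT_drop (prices : List Int) (j i : Nat) (hj : j < i) (hi : i < prices.length)
    (hnd : ∀ k, j < k → k < i → prices.getD j 0 ≤ prices.getD k 0)
    (hd : prices.getD i 0 < prices.getD j 0) :
    specT prices j = (i : Int) - (j : Int) := by
  unfold specT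
  have hlen : (prices.drop (j + 1)).length = prices.length - (j + 1) := by simp
  have hk : i - (j + 1) < (prices.drop (j + 1)).length := by omega
  rw [aTimeA_found _ _ (i - (j + 1)) hk]
  · omega
  · intro m hm
    rw [getD_drop]
    have h1 : j < j + 1 + m := by omega
    have h2 : j + 1 + m < i := by omega
    exact not_lt.mpr (hnd _ h1 h2)
  · rw [getD_drop]
    have : j + 1 + (i - (j + 1)) = i := by omega
    rw [this]; exact hd

lemma specT_none (prices : List Int) (j : Nat) (hj : j < prices.length)
    (hnd : ∀ k, j < k → k < prices.length → prices.getD j 0 ≤ prices.getD k 0) :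
    specT prices j = (prices.length : Int) - 1 - (j : Int) := by
  unfold specT
  rw [aTimeA_none]
  · simp only [List.length_drop]; omega
  · intro m hm
    rw [getD_drop]
    simp only [List.length_drop] at hm
    exact not_lt.mpr (hnd _ (by omega) (by omega))

-- invariant of B's main loop, after processing indices < i
def BInv (prices : List Int) (i : Nat) (s : List Nat) (ans : List Int) : Prop :=
  ans.length = prices.length ∧
  (∀ j ∈ s, j < i) ∧
  List.Pairwise (· > ·) s ∧
  (∀ j ∈ s, ∀ k, j < k → k < i → prices.getD j 0 ≤ prices.getD k 0) ∧
  (∀ j, j < i → j ∉ s → ans.getD j 0 = specT prices j)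

lemma popLoop_spec (prices : List Int) (i : Nat) (hi : i < prices.length)
    (s : List Nat) (ans : List Int) (hInv : BInv prices i s ans) :
    BInv prices i (popLoop prices (prices.getD i 0) i s ans).1
      (popLoop prices (prices.getD i 0) i s ans).2 ∧
    (∀ j ∈ (popLoop prices (prices.getD i 0) i s ans).1, ∀ k, j < k → k < i + 1 →
       prices.getD j 0 ≤ prices.getD k 0) := by
  induction s generalizing ans with
  | nil =>
    refine ⟨hInv, ?_⟩
    intro j hj; simp [popLoop] at hj
  | cons j s ih =>
    obtain ⟨h1, h2, h3, h4, h5⟩ := hInv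
    by_cases hcmp : prices.getD j 0 > prices.getD i 0
    · simp only [popLoop, hcmp, if_true]
      apply ih
      refine ⟨by simp [h1], fun m hm => h2 m (List.mem_cons_of_mem _ hm),
              h3.of_cons, fun m hm => h4 m (List.mem_cons_of_mem _ hm), ?_⟩
      intro m hm hms
      by_cases hmj : m = j
      · subst hmj
        have hjlen : m < prices.length := lt_trans (h2 m (List.mem_cons_self ..)) hi
        rw [List.getD_eq_getElem?_getD, List.getElem?_set_self (by omega)]
        simp only [Option.getD_some]
        exact (specT_drop prices m i (h2 m (List.mem_cons_self ..)) hi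
          (h4 m (List.mem_cons_self ..)) hcmp).symm
      · rw [List.getD_eq_getElem?_getD, List.getElem?_set_ne (fun h => hmj h.symm),
            ← List.getD_eq_getElem?_getD]
        exact h5 m hm (by simp [hmj, hms])
    · simp only [popLoop, hcmp, if_false]
      refine ⟨⟨h1, h2, h3, h4, h5⟩, ?_⟩
      intro m hm k hk1 hk2
      by_cases hki : k = i
      · subst hki
        rcases List.mem_cons.mp hm with hmj | hms
        · subst hmj; exact not_lt.mp hcmp
        · have hmlt : m < j := List.rel_of_pairwise_cons h3 hms
          calc prices.getD m 0 ≤ prices.getD j 0 :=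
                h4 m (List.mem_cons_of_mem _ hms) j hmlt (h2 j (List.mem_cons_self ..))
            _ ≤ prices.getD k 0 := not_lt.mp hcmp
      · exact h4 m hm k hk1 (by omega)

lemma drain_spec (prices : List Int) (s : List Nat) (ans : List Int)
    (h1 : ans.length = prices.length)
    (h2 : ∀ j ∈ s, j < prices.length)
    (h3 : List.Pairwise (· > ·) s)
    (h4 : ∀ j ∈ s, ∀ k, j < k → k < prices.length → prices.getD j 0 ≤ prices.getD k 0)
    (h5 : ∀ j, j < prices.length → j ∉ s →
       ans.getD j 0 = specT prices j) :
    (drainLoop prices.length s ans).length = prices.length ∧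
    ∀ j, j < prices.length → (drainLoop prices.length s ans).getD j 0 = specT prices j := by
  induction s generalizing ans with
  | nil =>
    refine ⟨h1, fun j hj => h5 j hj (by simp)⟩
  | cons j s ih =>
    simp only [drainLoop]
    apply ih
    · simp [h1]
    · exact fun m hm => h2 m (List.mem_cons_of_mem _ hm)
    · exact h3.of_cons
    · exact fun m hm => h4 m (List.mem_cons_of_mem _ hm)
    · intro m hm hms
      by_cases hmj : m = j
      · subst hmj
        rw [List.getD_eq_getElem?_getD, List.getElem?_set_self (by omega)]
        simp only [Option.getD_some]
        exact (specT_none prices m (h2 m (List.mem_cons_self ..))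
          (h4 m (List.mem_cons_self ..))).symm
      · rw [List.getD_eq_getElem?_getD, List.getElem?_set_ne (fun h => hmj h.symm),
            ← List.getD_eq_getElem?_getD]
        exact h5 m hm (by simp [hmj, hms])

lemma main_inv (prices : List Int) (i : Nat) (hi : i ≤ prices.length) :
    BInv prices i
      ((List.range i).foldl
        (fun st k =>
          let r := popLoop prices (prices.getD k 0) k st.1 st.2
          (k :: r.1, r.2))
        ([], List.replicate prices.length 0)).1
      ((List.range i).foldl
        (fun st k =>
          let r := popLoop prices (prices.getD k 0) k st.1 st.2
          (k :: r.1, r.2))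
        ([], List.replicate prices.length 0)).2 := by
  induction i with
  | zero =>
    refine ⟨by simp, by simp, by simp, by simp, ?_⟩
    intro j hj; omega
  | succ i ih =>
    have hi' : i < prices.length := hi
    have ihInv := ih (le_of_lt hi')
    rw [List.range_succ, List.foldl_append, List.foldl_cons, List.foldl_nil]
    obtain ⟨⟨h1, h2, h3, h4, h5⟩, hnext⟩ :=
      popLoop_spec prices i hi' _ _ ihInv
    refine ⟨h1, ?_, ?_, ?_, ?_⟩
    · intro j hj
      rcases List.mem_cons.mp hj with rfl | hj
      · omega
      · exact lt_trans (h2 j hj) (by omega)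
    · exact List.pairwise_cons.mpr ⟨fun m hm => h2 m hm, h3⟩
    · intro j hj k hk1 hk2
      rcases List.mem_cons.mp hj with rfl | hj
      · omega
      · exact hnext j hj k hk1 hk2
    · intro j hj hjs
      have hj' : j < i := by
        rcases Nat.lt_succ_iff_lt_or_eq.mp hj with h | rfl
        · exact h
        · exact absurd (List.mem_cons_self ..) hjs
      exact h5 j hj' (fun h => hjs (List.mem_cons_of_mem _ h))

lemma solution_alt_getD (prices : List Int) :
    (solution_alt prices).length = prices.length ∧
    ∀ j, j < prices.length → (solution_alt prices).getD j 0 = specT prices j := by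
  unfold solution_alt
  obtain ⟨h1, h2, h3, h4, h5⟩ := main_inv prices prices.length le_rfl
  exact drain_spec prices _ _ h1 h2 h3 h4 h5

-- ===== VERDICT (by name: the statement is the Claim_ definition above) =====
theorem solution_spec : Claim_equal_solution := by
  intro prices _
  show solution prices = solution_alt prices
  obtain ⟨hlen, hval⟩ := solution_alt_getD prices
  apply List.ext_getElem
  · simp [solution, hlen]
  · intro j hj1 hj2
    have hjp : j < prices.length := by simpa [solution] using hj1
    have := hval j hjp
    rw [List.getD_eq_getElem?_getD, List.getElem?_eq_getElem hj2] at this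
    simp only [Option.getD_some] at this
    rw [this]
    simp [solution, specT]
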